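-- pv_equiv track=rewrite | github.com/lrnselfreliance/wrolpi | modules/docs/extractors.py | _resolve_spine_labels
-- ===== SOURCE A (Python) =====
-- def _resolve_spine_labels(hrefs, href_to_label: dict) -> list:
--     """Assign each spine item a label, carrying the most recently-matched TOC label
--     forward so mid-chapter spine items inherit their chapter's label.
--
--     `hrefs` is a list of (file_name, get_name) tuples in spine order. Items before
--     the first TOC match (e.g. cover, title page) get a generic `Section N` fallback.
--     """
--     labels: list = []
--     current_label = None
--     for ordinal, (file_name, get_name) in enumerate(hrefs):
--         new_label = href_to_label.get(file_name) or href_to_label.get(get_name)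
--         if new_label:
--             current_label = new_label
--         labels.append(current_label or f'Section {ordinal + 1}')
--     return labels
-- ===== SOURCE B (Python) =====
-- def _resolve_spine_labels(hrefs, href_to_label: dict) -> list:
--     """Segment-based: find the anchor positions where a TOC label matches, then
--     build the output as runs, each anchor's label replicated up to the next anchor."""
--     n = len(hrefs)
--     anchors = []
--     for i, (file_name, get_name) in enumerate(hrefs):
--         label = href_to_label.get(file_name) or href_to_label.get(get_name)
--         if label:
--             anchors.append((i, label))
--     first = anchors[0][0] if anchors else n
--     out = ['Section %d' % (i + 1) for i in range(first)]
--     for k, (i, label) in enumerate(anchors):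
--         j = anchors[k + 1][0] if k + 1 < len(anchors) else n
--         out += [label] * (j - i)
--     return out
-- ===== Notes on version B (the rewrite author's own statement) =====
-- stated objective: alternative
-- what changed: Instead of A's single elementwise scan carrying a current-label variable, B first extracts the list of anchor positions (spine items whose TOC lookup is truthy) and then constructs the output as runs: a generic 'Section N' prefix before the first anchor, followed by each anchor's label replicated up to the next anchor's index.
import Mathlib
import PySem

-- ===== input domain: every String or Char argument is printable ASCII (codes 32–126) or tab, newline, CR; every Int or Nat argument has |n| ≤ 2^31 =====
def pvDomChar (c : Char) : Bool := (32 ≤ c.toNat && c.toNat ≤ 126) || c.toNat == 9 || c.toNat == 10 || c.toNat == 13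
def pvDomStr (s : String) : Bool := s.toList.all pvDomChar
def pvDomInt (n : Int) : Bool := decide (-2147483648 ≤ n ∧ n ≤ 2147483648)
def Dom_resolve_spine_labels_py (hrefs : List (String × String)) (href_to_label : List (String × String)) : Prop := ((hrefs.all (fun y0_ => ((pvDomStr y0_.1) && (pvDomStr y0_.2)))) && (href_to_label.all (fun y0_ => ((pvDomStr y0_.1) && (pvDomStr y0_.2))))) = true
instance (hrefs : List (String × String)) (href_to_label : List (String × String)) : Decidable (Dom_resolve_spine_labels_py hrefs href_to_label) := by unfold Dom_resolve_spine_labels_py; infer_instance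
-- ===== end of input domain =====

-- B replaces A's elementwise scan (carrying a current-label variable) by a run/segment
-- construction: collect the anchor positions first, then emit a generic prefix and one
-- replicated block per anchor; same cost, alternative algorithm.

-- Python truthiness of an Optional[str]: None and '' are falsy (both Pythons apply `or`
-- to optional strings, so both ports share these two helpers).
def pvTruthy : Option String → Bool
  | some s => !(s == "")
  | none => false

-- Python `a or b` on Optional[str] values.
def pvOr (a b : Option String) : Option String := if pvTruthy a then a else b

-- ===== PORT A =====
-- Python `a or s` where s is a (truthy) string (A's `current_label or f'Section {…}'`).
def pvOrStr (a : Option String) (s : String) : String :=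
  match a with
  | some t => if t == "" then s else t
  | none => s

-- A's loop: enumerate index, current_label state, append per item.
def loopA (d : List (String × String)) : Nat → Option String → List (String × String) → List String
  | _, _, [] => []
  | i, cur, (fn, gn) :: rest =>
    let nl := pvOr (d.lookup fn) (d.lookup gn)
    let cur' := if pvTruthy nl then nl else cur
    pvOrStr cur' ("Section " ++ toString (i + 1)) :: loopA d (i + 1) cur' rest

def resolve_spine_labels_py (hrefs : List (String × String)) (href_to_label : List (String × String)) : List String :=
  loopA href_to_label 0 none hrefs

-- ===== PORT B =====
-- pass 1: the anchors — (index, label) for each spine item whose lookup is truthy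
def anchorsB (d : List (String × String)) : Nat → List (String × String) → List (Nat × String)
  | _, [] => []
  | i, (fn, gn) :: rest =>
    match pvOr (d.lookup fn) (d.lookup gn) with
    | some lab => if lab == "" then anchorsB d (i + 1) rest else (i, lab) :: anchorsB d (i + 1) rest
    | none => anchorsB d (i + 1) rest

-- `anchors[k+1][0] if k+1 < len(anchors) else n` seen from the tail starting at k+1
def nextIdxB (anchors : List (Nat × String)) (n : Nat) : Nat :=
  match anchors with
  | [] => n
  | (i, _) :: _ => i

-- pass 2 of the output: each anchor's label replicated up to the next anchor (or n)
def emitB (n : Nat) : List (Nat × String) → List String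
  | [] => []
  | (i, lab) :: rest => List.replicate (nextIdxB rest n - i) lab ++ emitB n rest

def resolve_spine_labels_py_alt (hrefs : List (String × String)) (href_to_label : List (String × String)) : List String :=
  let n := hrefs.length
  let anchors := anchorsB href_to_label 0 hrefs
  let first := nextIdxB anchors n
  (List.range first).map (fun i => "Section " ++ toString (i + 1)) ++ emitB n anchors

-- ===== PRECONDITION & SPEC =====
def Spec_resolve_spine_labels_py (hrefs : List (String × String)) (href_to_label : List (String × String)) (out : List String) : Prop := out = resolve_spine_labels_py_alt hrefs href_to_label
instance (hrefs : List (String × String)) (href_to_label : List (String × String)) (out : List String) : Decidable (Spec_resolve_spine_labels_py hrefs href_to_label out) := by unfold Spec_resolve_spine_labels_py; infer_instance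

-- ===== CLAIM (what is proved, stated in full; the proofs are below) =====
def Claim_equal_resolve_spine_labels_py : Prop := ∀ (hrefs : List (String × String)) (href_to_label : List (String × String)), Dom_resolve_spine_labels_py hrefs href_to_label → Spec_resolve_spine_labels_py hrefs href_to_label (resolve_spine_labels_py hrefs href_to_label)

-- ===== LEMMAS AND PROOFS =====

theorem nextIdxB_cons (i : Nat) (lab : String) (rest : List (Nat × String)) (n : Nat) :
    nextIdxB ((i, lab) :: rest) n = i := rfl

theorem emitB_cons (n i : Nat) (lab : String) (rest : List (Nat × String)) :
    emitB n ((i, lab) :: rest) = List.replicate (nextIdxB rest n - i) lab ++ emitB n rest := rfl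

-- all anchor indices are ≥ the starting enumeration index, so nextIdxB is ≥ it too
theorem nextIdx_ge (d : List (String × String)) (xs : List (String × String)) :
    ∀ i : Nat, i ≤ nextIdxB (anchorsB d i xs) (i + xs.length) := by
  induction xs with
  | nil => intro i; simp [anchorsB, nextIdxB]
  | cons p rest ih =>
    intro i
    obtain ⟨fn, gn⟩ := p
    have hn' : i + ((fn, gn) :: rest).length = (i + 1) + rest.length := by simp; omega
    rw [hn']
    cases h : pvOr (d.lookup fn) (d.lookup gn) with
    | none =>
      simp only [anchorsB, h]
      exact le_trans (Nat.le_succ i) (ih (i + 1))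
    | some lab =>
      by_cases hz : lab = ""
      · have hzb : (lab == "") = true := by simp [hz]
        simp only [anchorsB, h, hzb, if_true]
        exact le_trans (Nat.le_succ i) (ih (i + 1))
      · have hzb : (lab == "") = false := by simp [hz]
        simp [anchorsB, h, hzb, nextIdxB]

-- A's loop from a truthy carried label equals one replicated block up to the next
-- anchor, then the emitted anchor blocks.
theorem loopA_truthy (d : List (String × String)) (xs : List (String × String)) :
    ∀ (i : Nat) (lab : String), lab ≠ "" →
      loopA d i (some lab) xs =
        List.replicate (nextIdxB (anchorsB d i xs) (i + xs.length) - i) lab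
          ++ emitB (i + xs.length) (anchorsB d i xs) := by
  induction xs with
  | nil => intro i lab _; simp [loopA, anchorsB, nextIdxB, emitB]
  | cons p rest ih =>
    intro i lab hlab
    obtain ⟨fn, gn⟩ := p
    have hn' : i + ((fn, gn) :: rest).length = (i + 1) + rest.length := by simp; omega
    rw [hn']
    cases h : pvOr (d.lookup fn) (d.lookup gn) with
    | none =>
      simp only [loopA, anchorsB, h, pvTruthy, Bool.false_eq_true, if_false]
      have hj := nextIdx_ge d rest (i + 1)
      have hrep : nextIdxB (anchorsB d (i + 1) rest) ((i + 1) + rest.length) - i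
          = (nextIdxB (anchorsB d (i + 1) rest) ((i + 1) + rest.length) - (i + 1)) + 1 := by omega
      rw [hrep, List.replicate_succ, ih (i + 1) lab hlab]
      simp [pvOrStr, hlab]
    | some nl =>
      by_cases hz : nl = ""
      · have hzb : (nl == "") = true := by simp [hz]
        simp only [loopA, anchorsB, h, hzb, if_true, pvTruthy, Bool.not_true,
          Bool.false_eq_true, if_false]
        have hj := nextIdx_ge d rest (i + 1)
        have hrep : nextIdxB (anchorsB d (i + 1) rest) ((i + 1) + rest.length) - i
            = (nextIdxB (anchorsB d (i + 1) rest) ((i + 1) + rest.length) - (i + 1)) + 1 := by omega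
        rw [hrep, List.replicate_succ, ih (i + 1) lab hlab]
        simp [pvOrStr, hlab]
      · have hzb : (nl == "") = false := by simp [hz]
        simp only [loopA, anchorsB, h, hzb, Bool.false_eq_true, if_false, pvTruthy,
          Bool.not_false, if_true, nextIdxB_cons, emitB_cons]
        have hj := nextIdx_ge d rest (i + 1)
        have hrep : nextIdxB (anchorsB d (i + 1) rest) ((i + 1) + rest.length) - i
            = (nextIdxB (anchorsB d (i + 1) rest) ((i + 1) + rest.length) - (i + 1)) + 1 := by omega
        rw [Nat.sub_self, List.replicate_zero, List.nil_append, hrep, List.replicate_succ,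
          ih (i + 1) nl hz]
        simp [pvOrStr, hz]

-- A's loop from no carried label equals the generic prefix up to the first anchor,
-- then the emitted anchor blocks.
theorem loopA_none (d : List (String × String)) (xs : List (String × String)) :
    ∀ i : Nat,
      loopA d i none xs =
        (List.range' i (nextIdxB (anchorsB d i xs) (i + xs.length) - i)).map
            (fun k => "Section " ++ toString (k + 1))
          ++ emitB (i + xs.length) (anchorsB d i xs) := by
  induction xs with
  | nil => intro i; simp [loopA, anchorsB, nextIdxB, emitB]
  | cons p rest ih =>
    intro i
    obtain ⟨fn, gn⟩ := p
    have hn' : i + ((fn, gn) :: rest).length = (i + 1) + rest.length := by simp; omega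
    rw [hn']
    cases h : pvOr (d.lookup fn) (d.lookup gn) with
    | none =>
      simp only [loopA, anchorsB, h, pvTruthy, Bool.false_eq_true, if_false]
      have hj := nextIdx_ge d rest (i + 1)
      have hrep : nextIdxB (anchorsB d (i + 1) rest) ((i + 1) + rest.length) - i
          = (nextIdxB (anchorsB d (i + 1) rest) ((i + 1) + rest.length) - (i + 1)) + 1 := by omega
      rw [hrep, List.range'_succ, ih (i + 1)]
      simp [pvOrStr]
    | some nl =>
      by_cases hz : nl = ""
      · have hzb : (nl == "") = true := by simp [hz]
        simp only [loopA, anchorsB, h, hzb, if_true, pvTruthy, Bool.not_true,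
          Bool.false_eq_true, if_false]
        have hj := nextIdx_ge d rest (i + 1)
        have hrep : nextIdxB (anchorsB d (i + 1) rest) ((i + 1) + rest.length) - i
            = (nextIdxB (anchorsB d (i + 1) rest) ((i + 1) + rest.length) - (i + 1)) + 1 := by omega
        rw [hrep, List.range'_succ, ih (i + 1)]
        simp [pvOrStr]
      · have hzb : (nl == "") = false := by simp [hz]
        simp only [loopA, anchorsB, h, hzb, Bool.false_eq_true, if_false, pvTruthy,
          Bool.not_false, if_true, nextIdxB_cons, emitB_cons]
        have hj := nextIdx_ge d rest (i + 1)
        have hrep : nextIdxB (anchorsB d (i + 1) rest) ((i + 1) + rest.length) - i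
            = (nextIdxB (anchorsB d (i + 1) rest) ((i + 1) + rest.length) - (i + 1)) + 1 := by omega
        rw [Nat.sub_self, List.range'_zero, List.map_nil, List.nil_append, hrep,
          List.replicate_succ, loopA_truthy d rest (i + 1) nl hz]
        simp [pvOrStr, hz]

-- ===== VERDICT (by name: the statement is the Claim_ definition above) =====
theorem resolve_spine_labels_py_spec : Claim_equal_resolve_spine_labels_py := by
  intro hrefs d _
  unfold Spec_resolve_spine_labels_py resolve_spine_labels_py resolve_spine_labels_py_alt
  have := loopA_none d hrefs 0
  simpa [List.range_eq_range'] using this
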